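-- pv_equiv track=rewrite | github.com/maria-pugacheva/LeetCode | src/python/_01_easy/_1961_check-if-string-is-a-prefix-of-array.py | solution
-- ===== SOURCE A (Python) =====
-- from typing import List
--
-- def solution(s: str, words: List[str]) -> bool:
--     """Given a string s and an array of strings words, determine whether
--     s is a prefix string of words.
--
--     Examples:
--         >>> solution('ilovetocode', ['i', 'love', 'to' 'code', 'cake'])
--         True
--         >>> solution('ccccccccc', ['cc', 'ccc'])
--         False
--         >>> solution('fajsldfsa', ['faj', 's', 'ldfs', 'afdfs', 'f'])
--         False
--         >>> solution('ilikeleetcode', ['i', 'like', 'leetcodeq'])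
--         False
--     """
--     i, k = 0, len(s)
--     for w in words:
--         if i == k:
--             break
--         t = i
--         for j in range(len(w)):
--             if (t < k and w[j] != s[t]) or (t == k and 0 < j < len(w)):
--                 return False
--             t += 1
--         i = t
--     return i >= k
-- ===== SOURCE B (Python) =====
-- from typing import List
--
-- def solution(s: str, words: List[str]) -> bool:
--     concat = ''.join(words)
--     boundaries = {0}
--     total = 0
--     for w in words:
--         total += len(w)
--         boundaries.add(total)
--     return len(s) in boundaries and concat.startswith(s)
-- ===== Notes on version B (the rewrite author's own statement) =====
-- stated objective: simpler
-- what changed: Replaces A's nested per-character index walk with early returns by one concatenation plus a set of cumulative word-boundary offsets: return len(s) in boundaries and concat.startswith(s).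
import Mathlib
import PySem

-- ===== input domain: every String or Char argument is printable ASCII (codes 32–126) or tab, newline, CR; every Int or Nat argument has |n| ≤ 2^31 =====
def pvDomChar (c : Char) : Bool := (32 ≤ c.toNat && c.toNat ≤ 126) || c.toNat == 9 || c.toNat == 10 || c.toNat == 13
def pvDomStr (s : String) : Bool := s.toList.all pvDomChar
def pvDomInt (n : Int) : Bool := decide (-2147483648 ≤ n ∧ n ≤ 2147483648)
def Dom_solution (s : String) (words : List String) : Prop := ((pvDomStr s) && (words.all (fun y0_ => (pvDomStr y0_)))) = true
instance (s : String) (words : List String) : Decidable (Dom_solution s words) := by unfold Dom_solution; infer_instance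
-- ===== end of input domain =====

-- B replaces A's nested per-character walk by a boundary-offset set plus one startswith; same cost, simpler.

-- ===== PORT A =====
-- inner 'for j in range(len(w))' loop of A: t is the running index into s, j the index into w;
-- 'return False' is modelled as none, normal fall-through returns the final t.
def innerA (sc : List Char) (k wlen : Int) : List Char → Int → Int → Option Int
  | [], t, _ => some t
  | c :: rest, t, j =>
    if (t < k ∧ ¬ some c = PySem.List.pyGet? sc t) ∨ (t = k ∧ 0 < j ∧ j < wlen) then none
    else innerA sc k wlen rest (t + 1) (j + 1)

-- outer 'for w in words' loop of A with accumulator i; 'break' returns i >= k at once.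
def loopA (sc : List Char) (k : Int) : List String → Int → Bool
  | [], i => decide (i ≥ k)
  | w :: ws, i =>
    if i = k then decide (i ≥ k)
    else
      match innerA sc k ((w.toList.length : Int)) w.toList i 0 with
      | none => false
      | some t => loopA sc k ws t

def solution (s : String) (words : List String) : Bool :=
  loopA s.toList (s.toList.length : Int) words 0

-- ===== PORT B =====
-- concat = ''.join(words); boundaries = {0} ∪ cumulative lengths; len(s) in boundaries and concat.startswith(s)
def solution_alt (s : String) (words : List String) : Bool :=
  let concat := PySem.Str.join "" words
  let bt := words.foldl
    (fun (p : PySem.Set Int × Int) w =>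
      let total := p.2 + (w.toList.length : Int)
      (PySem.Set.add p.1 total, total))
    (PySem.Set.ofList [0], 0)
  PySem.Set.contains bt.1 (s.toList.length : Int) && PySem.Str.startswith concat s

-- ===== PRECONDITION & SPEC =====
def Spec_solution (s : String) (words : List String) (out : Bool) : Prop := out = solution_alt s words
instance (s : String) (words : List String) (out : Bool) : Decidable (Spec_solution s words out) := by unfold Spec_solution; infer_instance

-- ===== CLAIM (what is proved, stated in full; the proofs are below) =====
def Claim_equal_solution : Prop := ∀ (s : String) (words : List String), Dom_solution s words → Spec_solution s words (solution s words)

-- ===== LEMMAS AND PROOFS =====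

-- cumulative word-boundary offsets starting from t (excluding t itself)
def cums (t : Int) : List String → List Int
  | [] => []
  | w :: ws => (t + (w.toList.length : Int)) :: cums (t + (w.toList.length : Int)) ws

theorem cums_ge (x : Int) : ∀ (ws : List String) (t : Int), x ∈ cums t ws → t ≤ x := by
  intro ws
  induction ws with
  | nil => intro t h; simp [cums] at h
  | cons w rest ih =>
    intro t h
    simp only [cums, List.mem_cons] at h
    rcases h with h | h
    · omega
    · have := ih _ h; omega

theorem innerA_eq (sc : List Char) (L : Nat) :
    ∀ (wc : List Char) (t j : Nat), j + wc.length = L → t ≤ sc.length → (t = sc.length → 1 ≤ j) →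
    innerA sc (sc.length : Int) (L : Int) wc (t : Int) (j : Int) =
      if t + wc.length ≤ sc.length ∧ wc <+: sc.drop t then some ((t + wc.length : Nat) : Int)
      else none := by
  intro wc
  induction wc with
  | nil =>
    intro t j _ ht _
    simp [innerA, List.nil_prefix, ht]
  | cons c rest ih =>
    intro t j hL ht hj
    by_cases htl : t = sc.length
    · subst htl
      rw [innerA, if_pos (Or.inr ⟨rfl, by have := hj rfl; omega, by
          simp only [List.length_cons] at hL; omega⟩)]
      rw [if_neg (by rintro ⟨h, _⟩; simp only [List.length_cons] at h; omega)]
    · have htlt : t < sc.length := by omega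
      have hget : PySem.List.pyGet? sc (t : Int) = some sc[t] := by
        rw [PySem.List.pyGet?_natCast]
        exact List.getElem?_eq_getElem htlt
      have hdrop : sc.drop t = sc[t] :: sc.drop (t + 1) := (List.getElem_cons_drop htlt).symm
      by_cases hc : c = sc[t]
      · rw [innerA, if_neg]
        · have hc1 : ((t : Int)) + 1 = ((t + 1 : Nat) : Int) := by push_cast; ring
          have hc2 : ((j : Int)) + 1 = ((j + 1 : Nat) : Int) := by push_cast; ring
          rw [hc1, hc2, ih (t + 1) (j + 1) (by simp at hL ⊢; omega) (by omega) (by omega)]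
          have hiff : ((t + 1) + rest.length ≤ sc.length ∧ rest <+: sc.drop (t + 1)) ↔
              (t + (c :: rest).length ≤ sc.length ∧ (c :: rest) <+: sc.drop t) := by
            rw [hdrop]
            constructor
            · rintro ⟨hl, hp⟩
              exact ⟨by simp; omega, by rw [List.cons_prefix_cons]; exact ⟨hc, hp⟩⟩
            · rintro ⟨hl, hp⟩
              rw [List.cons_prefix_cons] at hp
              exact ⟨by simp at hl; omega, hp.2⟩
          by_cases hcase : (t + (c :: rest).length ≤ sc.length ∧ (c :: rest) <+: sc.drop t)
          · rw [if_pos (hiff.mpr hcase), if_pos hcase]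
            congr 1
            simp
            omega
          · rw [if_neg (fun h => hcase (hiff.mp h)), if_neg hcase]
        · rintro (⟨_, hne⟩ | ⟨heq, _⟩)
          · exact hne (by rw [hget, hc])
          · omega
      · rw [innerA, if_pos, if_neg]
        · rintro ⟨_, hp⟩
          rw [hdrop, List.cons_prefix_cons] at hp
          exact hc hp.1
        · left
          refine ⟨by omega, ?_⟩
          rw [hget]
          simp [hc]

theorem loopA_iff (sc : List Char) :
    ∀ (ws : List String) (i : Nat), i ≤ sc.length →
    (loopA sc (sc.length : Int) ws (i : Int) = true ↔
      (((sc.length : Int) = (i : Int) ∨ (sc.length : Int) ∈ cums (i : Int) ws) ∧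
        sc.drop i <+: (ws.map String.toList).flatten)) := by
  intro ws
  induction ws with
  | nil =>
    intro i hi
    simp only [loopA, cums, List.map_nil, List.flatten_nil, List.mem_nil_iff, or_false,
      decide_eq_true_eq, ge_iff_le, List.prefix_nil, List.drop_eq_nil_iff]
    omega
  | cons w rest ih =>
    intro i hi
    by_cases hik : i = sc.length
    · subst hik
      simp [loopA, List.drop_length]
    · have hlt : i < sc.length := by omega
      rw [loopA, if_neg (by intro h; omega)]
      rw [show (0 : Int) = ((0 : Nat) : Int) from rfl,
        innerA_eq sc w.toList.length w.toList i 0 (by simp) (by omega) (by omega)]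
      by_cases hcase : (i + w.toList.length ≤ sc.length ∧ w.toList <+: sc.drop i)
      · rw [if_pos hcase]
        change loopA sc (sc.length : Int) rest ((i + w.toList.length : Nat) : Int) = true ↔ _
        obtain ⟨hlen, hpre⟩ := hcase
        rw [ih (i + w.toList.length) (by omega)]
        have hdropsplit : sc.drop i = w.toList ++ sc.drop (i + w.toList.length) := by
          obtain ⟨suf, hsuf⟩ := hpre
          rw [← hsuf]
          congr 1
          have : (sc.drop i).drop w.toList.length = sc.drop (i + w.toList.length) := by
            rw [List.drop_drop]
            try congr 1
            try omega
          rw [← this, ← hsuf]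
          simp
        constructor
        · rintro ⟨hb, hp⟩
          refine ⟨?_, ?_⟩
          · right
            simp only [cums, List.mem_cons]
            rcases hb with hb | hb
            · left; push_cast at hb ⊢; omega
            · right
              have : ((i : Int)) + ((w.toList.length : Nat) : Int) = ((i + w.toList.length : Nat) : Int) := by push_cast; ring
              rw [this]; exact hb
          · rw [hdropsplit]
            simp only [List.map_cons, List.flatten_cons]
            exact (List.prefix_append_right_inj w.toList).mpr hp
        · rintro ⟨hb, hp⟩
          have hcast : ((i : Int)) + ((w.toList.length : Nat) : Int) = ((i + w.toList.length : Nat) : Int) := by push_cast; ring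
          refine ⟨?_, ?_⟩
          · rcases hb with hb | hb
            · exfalso; omega
            · simp only [cums, List.mem_cons, hcast] at hb
              rcases hb with hb | hb
              · left; exact hb
              · right; exact hb
          · rw [hdropsplit] at hp
            simp only [List.map_cons, List.flatten_cons] at hp
            exact (List.prefix_append_right_inj w.toList).mp hp
      · rw [if_neg hcase]
        change false = true ↔ _
        simp only [Bool.false_eq_true, false_iff]
        rintro ⟨hb, hp⟩
        have hblen : i + w.toList.length ≤ sc.length := by
          rcases hb with hb | hb
          · exfalso; omega
          · simp only [cums, List.mem_cons] at hb
            have : ((i : Int)) + ((w.toList.length : Nat) : Int) ≤ (sc.length : Int) := by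
              rcases hb with hb | hb
              · omega
              · have := cums_ge _ _ _ hb; omega
            push_cast at this; omega
        apply hcase
        refine ⟨hblen, ?_⟩
        simp only [List.map_cons, List.flatten_cons] at hp
        apply List.prefix_of_prefix_length_le (List.prefix_append _ _) hp
        have : (sc.drop i).length = sc.length - i := by simp
        omega

theorem chars_join_empty : ∀ (l : List (List Char)), PySem.Chars.join [] l = l.flatten := by
  intro l
  induction l with
  | nil => simp [PySem.Chars.join_nil]
  | cons p rest ih =>
    cases rest with
    | nil => simp [PySem.Chars.join_singleton]
    | cons q r =>
      rw [PySem.Chars.join_cons_cons]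
      simp only [List.flatten_cons]
      rw [ih]
      simp

theorem B_set_mem (L : Int) :
    ∀ (ws : List String) (acc : PySem.Set Int) (t : Int),
    (L ∈ (ws.foldl
      (fun (p : PySem.Set Int × Int) w =>
        let total := p.2 + (w.toList.length : Int)
        (PySem.Set.add p.1 total, total))
      (acc, t)).1 ↔ L ∈ acc ∨ L ∈ cums t ws) := by
  intro ws
  induction ws with
  | nil => intro acc t; simp [cums]
  | cons w rest ih =>
    intro acc t
    simp only [List.foldl_cons]
    rw [ih]
    rw [PySem.Set.mem_add]
    simp only [cums, List.mem_cons]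
    tauto

theorem solution_iff (s : String) (words : List String) :
    solution s words = true ↔
      (((s.toList.length : Int) = 0 ∨ (s.toList.length : Int) ∈ cums 0 words) ∧
        s.toList <+: (words.map String.toList).flatten) := by
  unfold solution
  have h := loopA_iff s.toList words 0 (by omega)
  simpa using h

theorem solution_alt_iff (s : String) (words : List String) :
    solution_alt s words = true ↔
      (((s.toList.length : Int) = 0 ∨ (s.toList.length : Int) ∈ cums 0 words) ∧
        s.toList <+: (words.map String.toList).flatten) := by
  unfold solution_alt
  simp only [Bool.and_eq_true]
  constructor
  · rintro ⟨hm, hs⟩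
    constructor
    · have := (PySem.Set.contains_iff _ _).mp hm
      rw [B_set_mem] at this
      rcases this with h | h
      · left; simpa [PySem.Set.ofList] using h
      · right; exact h
    · rw [PySem.Str.startswith_eq, PySem.Chars.startswith_iff, PySem.Str.toList_join] at hs
      have : ("".toList : List Char) = [] := rfl
      rw [this, chars_join_empty] at hs
      exact hs
  · rintro ⟨hb, hp⟩
    constructor
    · rw [PySem.Set.contains_iff, B_set_mem]
      rcases hb with h | h
      · left
        have h0 : s.toList.length = 0 := by exact_mod_cast h
        simp [PySem.Set.ofList, h0]
      · right; exact h
    · rw [PySem.Str.startswith_eq, PySem.Chars.startswith_iff, PySem.Str.toList_join]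
      have : ("".toList : List Char) = [] := rfl
      rw [this, chars_join_empty]
      exact hp

-- ===== VERDICT (by name: the statement is the Claim_ definition above) =====
theorem solution_spec : Claim_equal_solution := by
  intro s words _
  unfold Spec_solution
  rw [Bool.eq_iff_iff, solution_iff, solution_alt_iff]
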